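-- pv_equiv track=rewrite | github.com/tormod23/d2rr-toolkit | tests/verification/verify_missing_stats.py | read_bits
-- ===== SOURCE A (Python) =====
-- def read_bits(data, start_bit, count):
--     result = 0
--     for i in range(count):
--         byte_idx = (start_bit + i) // 8
--         bit_idx = (start_bit + i) % 8
--         if byte_idx < len(data) and (data[byte_idx] >> bit_idx) & 1:
--             result |= 1 << i
--     return result
-- ===== SOURCE B (Python) =====
-- def read_bits(data, start_bit, count):
--     if count <= 0:
--         return 0
--     start_byte, bit_off = divmod(start_bit, 8)
--     nbytes = (bit_off + count + 7) // 8
--     chunk = bytes(b & 0xFF for b in data[start_byte:start_byte + nbytes])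
--     return (int.from_bytes(chunk, 'little') >> bit_off) & ((1 << count) - 1)
-- ===== Notes on version B (the rewrite author's own statement) =====
-- stated objective: faster
-- what changed: Instead of looping once per bit and OR-ing single bits, B slices the affected whole bytes, assembles them with int.from_bytes(..., 'little'), then shifts right by the bit offset and masks with (1 << count) - 1.
-- outside the precondition, e.g. on read_bits([5, 200], -8, 8): A returns 200, B returns 0
import Mathlib
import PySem

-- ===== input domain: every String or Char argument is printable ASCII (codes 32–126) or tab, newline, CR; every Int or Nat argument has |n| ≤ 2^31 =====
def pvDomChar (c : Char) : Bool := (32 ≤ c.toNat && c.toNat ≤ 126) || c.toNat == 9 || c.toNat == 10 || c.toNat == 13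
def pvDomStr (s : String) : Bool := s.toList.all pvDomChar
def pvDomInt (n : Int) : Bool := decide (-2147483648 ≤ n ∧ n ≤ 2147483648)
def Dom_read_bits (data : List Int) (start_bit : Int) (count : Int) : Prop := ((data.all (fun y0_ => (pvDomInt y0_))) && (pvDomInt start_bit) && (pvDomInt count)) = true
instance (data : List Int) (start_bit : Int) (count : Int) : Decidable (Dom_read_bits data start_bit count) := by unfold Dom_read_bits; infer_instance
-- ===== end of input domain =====

-- B reads whole bytes at once (slice + little-endian recombination + shift/mask) instead of A's
-- one-bit-per-iteration loop; equivalence is claimed for non-negative start_bit (see Pre_).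

-- ===== PORT A =====
-- literal transliteration of A's per-bit loop; data[byte_idx] is pyGet? (the .getD 0 default is
-- unreachable under Pre_: the guard byte_idx < len(data) with byte_idx ≥ 0 keeps the index in range);
-- shift amounts i and bit_idx are always ≥ 0 here, so .toNat is exact
def read_bits (data : List Int) (start_bit : Int) (count : Int) : Int :=
  (PySem.List.pyRange 0 count).foldl (fun result i =>
    let byte_idx := PySem.Int.floordiv (start_bit + i) 8
    let bit_idx := PySem.Int.mod (start_bit + i) 8
    if byte_idx < (data.length : Int) ∧
        PySem.Int.band (((PySem.List.pyGet? data byte_idx).getD 0) >>> bit_idx.toNat) 1 ≠ 0 then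
      PySem.Int.bor result (1 <<< i.toNat)
    else result) 0

-- ===== PORT B =====
-- transliteration of Source B: int.from_bytes(chunk, 'little') is the little-endian recombination
-- Σ chunk[k]·256^k, written as the standard foldr; b & 0xFF is band b 255; count > 0 in this
-- branch, so count.toNat is exact
def read_bits_alt (data : List Int) (start_bit : Int) (count : Int) : Int :=
  if count ≤ 0 then 0
  else
    let start_byte := PySem.Int.floordiv start_bit 8
    let bit_off := PySem.Int.mod start_bit 8
    let nbytes := PySem.Int.floordiv (bit_off + count + 7) 8
    let chunk := (PySem.List.slice data (some start_byte) (some (start_byte + nbytes))).map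
      (fun b => PySem.Int.band b 255)
    let val := chunk.foldr (fun b acc => acc * 256 + b) 0
    PySem.Int.band (val >>> bit_off.toNat) ((1 <<< count.toNat) - 1)

-- ===== PRECONDITION & SPEC =====
-- Pre_ excludes negative start_bit, where A indexes the buffer with negative byte indices: it raises
-- IndexError once the index falls below -len(data) and otherwise returns bits read from the END of the
-- buffer through Python's negative-index wraparound, an artefact no caller of a bit reader would want.
def Pre_read_bits (data : List Int) (start_bit : Int) (count : Int) : Prop := 0 ≤ start_bit
instance (data : List Int) (start_bit : Int) (count : Int) : Decidable (Pre_read_bits data start_bit count) := by unfold Pre_read_bits; infer_instance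
def pvWitness_read_bits : List Int × Int × Int := ([5, 200], 3, 10)

def Spec_read_bits (data : List Int) (start_bit : Int) (count : Int) (out : Int) : Prop := out = read_bits_alt data start_bit count
instance (data : List Int) (start_bit : Int) (count : Int) (out : Int) : Decidable (Spec_read_bits data start_bit count out) := by unfold Spec_read_bits; infer_instance

-- ===== CLAIM (what is proved, stated in full; the proofs are below) =====
def Claim_equal_read_bits : Prop := ∀ (data : List Int) (start_bit : Int) (count : Int), Dom_read_bits data start_bit count → Pre_read_bits data start_bit count → Spec_read_bits data start_bit count (read_bits data start_bit count)

-- ===== LEMMAS AND PROOFS =====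

-- the byte the bit stream sees at byte position k (0 past the end), as a Nat in [0, 256)
def pvByteAt (data : List Int) (k : Nat) : Nat := ((data.getD k 0) % 256).toNat

-- bit n of the little-endian bit stream over data
def pvBitAt (data : List Int) (n : Nat) : Nat := pvByteAt data (n / 8) / 2 ^ (n % 8) % 2

-- the value both programs compute: Σ_{i<c} bit(s+i)·2^i
def pvG (data : List Int) (s c : Nat) : Nat := ∑ i ∈ Finset.range c, pvBitAt data (s + i) * 2 ^ i

-- little-endian byte recombination (int.from_bytes), Nat level
def pvBytesVal (l : List Nat) : Nat := l.foldr (fun b acc => acc * 256 + b) 0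

theorem pvBitAt_lt_two (data : List Int) (n : Nat) : pvBitAt data n < 2 := by
  unfold pvBitAt; exact Nat.mod_lt _ (by norm_num)

theorem pvG_lt (data : List Int) (s c : Nat) : pvG data s c < 2 ^ c := by
  induction c with
  | zero => simp [pvG]
  | succ c ih =>
    unfold pvG at *
    rw [Finset.sum_range_succ]
    have := pvBitAt_lt_two data (s + c)
    have h2 : pvBitAt data (s + c) * 2 ^ c ≤ 2 ^ c := by
      have h1 := Nat.lt_succ_iff.mp (by omega : pvBitAt data (s + c) < 2)
      calc pvBitAt data (s + c) * 2 ^ c ≤ 1 * 2 ^ c := Nat.mul_le_mul_right _ h1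
        _ = 2 ^ c := one_mul _
    have hp : (2:Nat) ^ (c+1) = 2 ^ c + 2 ^ c := by ring
    omega

theorem pv_lor_two_pow (r i : Nat) (h : r < 2 ^ i) : r ||| 2 ^ i = r + 2 ^ i := by
  apply Nat.eq_of_testBit_eq
  intro j
  rw [Nat.testBit_lor, Nat.testBit_two_pow]
  rcases lt_trichotomy j i with hj | hj | hj
  · rw [Nat.add_comm, Nat.testBit_two_pow_add_gt hj]
    simp [Nat.ne_of_gt hj]
  · subst hj
    rw [Nat.add_comm, Nat.testBit_two_pow_add_eq, Nat.testBit_lt_two_pow h]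
    simp
  · have h1 : r + 2 ^ i < 2 ^ j := by
      have ha : (2:Nat) ^ (i+1) ≤ 2 ^ j := Nat.pow_le_pow_right (by norm_num) hj
      have hb : (2:Nat) ^ (i+1) = 2 ^ i + 2 ^ i := by ring
      omega
    rw [Nat.testBit_lt_two_pow h1,
        Nat.testBit_lt_two_pow (lt_trans h (Nat.pow_lt_pow_right (by norm_num) hj))]
    simp [show i ≠ j by omega]

-- Python's b & 0xFF is b mod 256, for every integer b
theorem pv_band_255 (b : Int) : PySem.Int.band b 255 = b % 256 := by
  by_cases hb : 0 ≤ b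
  · simp only [PySem.Int.band, hb, if_true, show (0:Int) ≤ 255 by norm_num]
    have h : b.toNat &&& (255:Int).toNat = b.toNat % 256 := Nat.and_two_pow_sub_one_eq_mod b.toNat 8
    rw [h]; omega
  · simp only [PySem.Int.band, hb, if_false, show (0:Int) ≤ 255 by norm_num, if_true]
    have h : (255:Int).toNat &&& (-b-1).toNat = (-b-1).toNat % 256 := by
      rw [Nat.and_comm]; exact Nat.and_two_pow_sub_one_eq_mod _ 8
    rw [h]; omega

theorem pv_low_byte_bit (n r : Nat) (h : r < 8) : (n % 256) / 2 ^ r % 2 = n / 2 ^ r % 2 := by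
  interval_cases r <;> omega

theorem pv_low_byte_bit_neg (n r : Nat) (h : r < 8) :
    (255 - n % 256) / 2 ^ r % 2 = 1 - n / 2 ^ r % 2 := by
  interval_cases r <;> omega

-- bit r (r < 8) of x, read Python-style as (x >> r) & 1 (here already as mod 2), for any integer x
theorem pv_bit_of_shift (x : Int) (r : Nat) (h : r < 8) :
    PySem.Int.mod (x >>> r) 2 = (((x % 256).toNat / 2 ^ r) % 2 : Nat) := by
  rw [PySem.Int.mod_eq_emod_of_pos (by norm_num)]
  cases x with
  | ofNat n =>
    show ((Int.ofNat n).shiftRight r) % 2 = _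
    simp only [Int.shiftRight, Nat.shiftRight_eq_div_pow, Int.ofNat_eq_natCast]
    have h1 : (((n:Nat):Int) % 256).toNat = n % 256 := by omega
    rw [h1, pv_low_byte_bit n r h]
    omega
  | negSucc n =>
    show ((Int.negSucc n).shiftRight r) % 2 = _
    simp only [Int.shiftRight, Nat.shiftRight_eq_div_pow, Int.negSucc_eq]
    have h1 : ((-(((n:Nat):Int) + 1)) % 256).toNat = 255 - n % 256 := by omega
    rw [h1, pv_low_byte_bit_neg n r h]
    omega

theorem pv_bor_natCast (a b : Nat) : PySem.Int.bor (↑a) (↑b) = ((a ||| b : Nat) : Int) := by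
  simp [PySem.Int.bor]

theorem pv_band_natCast (a b : Nat) : PySem.Int.band (↑a) (↑b) = ((a &&& b : Nat) : Int) := by
  simp [PySem.Int.band]

-- A's loop body applied to accumulator pvG s c at index c gives pvG s (c+1)
theorem pv_step (data : List Int) (s c : Nat) :
    (if PySem.Int.floordiv ((s:Int) + (c:Int)) 8 < (data.length : Int) ∧
        PySem.Int.band (((PySem.List.pyGet? data (PySem.Int.floordiv ((s:Int) + (c:Int)) 8)).getD 0) >>>
          (PySem.Int.mod ((s:Int) + (c:Int)) 8).toNat) 1 ≠ 0 then
      PySem.Int.bor ((pvG data s c : Nat) : Int) (1 <<< ((c:Int)).toNat)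
    else ((pvG data s c : Nat) : Int)) = ((pvG data s (c+1) : Nat) : Int) := by
  have hcast : (s:Int) + (c:Int) = ((s + c : Nat) : Int) := by push_cast; ring
  have h1 : PySem.Int.floordiv ((s + c : Nat) : Int) 8 = (((s+c)/8 : Nat) : Int) := by
    exact_mod_cast PySem.Int.floordiv_natCast (s+c) 8
  have h2 : PySem.Int.mod ((s + c : Nat) : Int) 8 = (((s+c) % 8 : Nat) : Int) := by
    exact_mod_cast PySem.Int.mod_natCast (s+c) 8
  rw [hcast, h1, h2, Int.toNat_natCast, Int.toNat_natCast, PySem.List.pyGet?_natCast]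
  have hbit : PySem.Int.band ((data[(s+c)/8]?.getD 0) >>> ((s+c) % 8)) 1
      = ((pvBitAt data (s+c) : Nat) : Int) := by
    rw [PySem.Int.band_one, pv_bit_of_shift _ _ (Nat.mod_lt _ (by norm_num))]
    unfold pvBitAt pvByteAt
    rw [List.getD_eq_getElem?_getD]
  rw [hbit, Nat.one_shiftLeft]
  have hG1 : pvG data s (c+1) = pvG data s c + pvBitAt data (s+c) * 2 ^ c := by
    unfold pvG; rw [Finset.sum_range_succ]
  by_cases hlen : ((s+c)/8 : Nat) < data.length
  · have hlen' : ((((s+c)/8 : Nat)) : Int) < (data.length : Int) := by exact_mod_cast hlen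
    have hbt := pvBitAt_lt_two data (s+c)
    rcases (by omega : pvBitAt data (s+c) = 0 ∨ pvBitAt data (s+c) = 1) with hb0 | hb1
    · simp [hb0, hG1]
    · rw [if_pos (by exact ⟨hlen', by rw [hb1]; norm_num⟩)]
      rw [pv_bor_natCast, pv_lor_two_pow _ _ (pvG_lt data s c), hG1, hb1]
      push_cast; ring
  · have hlen' : ¬ (((((s+c)/8 : Nat)) : Int) < (data.length : Int)) := by exact_mod_cast hlen
    rw [if_neg (by rintro ⟨h', -⟩; exact hlen' h')]
    have hb0 : pvBitAt data (s+c) = 0 := by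
      unfold pvBitAt pvByteAt
      rw [List.getD_eq_getElem?_getD, List.getElem?_eq_none (by omega), Option.getD_none]
      norm_num
    simp [hG1, hb0]

-- A equals the bit-sum pvG
theorem pv_A_eq_G (data : List Int) (s c : Nat) :
    read_bits data (s:Int) (c:Int) = ((pvG data s c : Nat) : Int) := by
  induction c with
  | zero =>
    simp [read_bits, pvG, show PySem.List.pyRange 0 0 = ([]:List Int) from by decide]
  | succ c ih =>
    unfold read_bits at *
    have hc : ((c+1 : Nat) : Int) = (c:Int) + 1 := by push_cast; ring
    rw [hc, PySem.List.pyRange_one_succ_right (by positivity : (0:Int) ≤ (c:Int)),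
        List.foldl_append, ih]
    simp only [List.foldl_cons, List.foldl_nil]
    exact pv_step data s c

theorem pv_bytesVal_div (l : List Nat) (hl : ∀ b ∈ l, b < 256) (q : Nat) :
    pvBytesVal l / 2 ^ (8 * q) = pvBytesVal (l.drop q) := by
  induction q generalizing l with
  | zero => simp
  | succ q ih =>
    cases l with
    | nil => simp [pvBytesVal]
    | cons b t =>
      have hb : b < 256 := hl b (by simp)
      have hpow : (2:Nat) ^ (8 * (q+1)) = 256 * 2 ^ (8 * q) := by
        rw [show 8 * (q+1) = 8 + 8 * q by ring, pow_add]; norm_num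
      rw [hpow, ← Nat.div_div_eq_div_mul]
      have hstep : pvBytesVal (b :: t) / 256 = pvBytesVal t := by
        show (pvBytesVal t * 256 + b) / 256 = pvBytesVal t
        omega
      rw [hstep, ih t (fun x hx => hl x (by simp [hx]))]
      simp

-- bit j of the recombined value is bit j%8 of byte j/8
theorem pv_bit_of_bytesVal (l : List Nat) (hl : ∀ b ∈ l, b < 256) (j : Nat) :
    pvBytesVal l / 2 ^ j % 2 = l.getD (j / 8) 0 / 2 ^ (j % 8) % 2 := by
  have hj : j = 8 * (j / 8) + j % 8 := by omega
  have hpow : (2:Nat) ^ j = 2 ^ (8 * (j / 8)) * 2 ^ (j % 8) := by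
    conv_lhs => rw [hj]
    rw [pow_add]
  rw [hpow, ← Nat.div_div_eq_div_mul, pv_bytesVal_div l hl (j / 8)]
  cases hdrop : l.drop (j / 8) with
  | nil =>
    have hlen : l.length ≤ j / 8 := by
      by_contra hcon
      exact absurd hdrop (by simp [List.drop_eq_nil_iff]; omega)
    rw [List.getD_eq_getElem?_getD, List.getElem?_eq_none (by omega), Option.getD_none]
    simp [pvBytesVal]
  | cons b t =>
    have hb : b < 256 := hl b (List.mem_of_mem_drop (hdrop ▸ List.mem_cons_self))
    have hget : l.getD (j / 8) 0 = b := by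
      have h0 : l[j / 8]? = (l.drop (j / 8))[0]? := by
        rw [List.getElem?_drop]; norm_num
      rw [List.getD_eq_getElem?_getD, h0, hdrop]
      rfl
    rw [hget]
    show (pvBytesVal t * 256 + b) / 2 ^ (j % 8) % 2 = b / 2 ^ (j % 8) % 2
    have hr : j % 8 < 8 := by omega
    generalize pvBytesVal t = V
    interval_cases h : (j % 8) <;> omega

-- binary digit expansion of x % 2^c
theorem pv_mod_two_pow_expand (x c : Nat) :
    x % 2 ^ c = ∑ i ∈ Finset.range c, (x / 2 ^ i % 2) * 2 ^ i := by
  induction c with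
  | zero => simp [Nat.mod_one]
  | succ c ih =>
    rw [Finset.sum_range_succ, ← ih, Nat.mod_pow_succ]
    ring

theorem pv_foldr_natCast (m : List Int) :
    (m.map (fun b => b % 256)).foldr (fun b acc => acc * 256 + b) (0:Int)
      = ((pvBytesVal (m.map (fun b => (b % 256).toNat)) : Nat) : Int) := by
  induction m with
  | nil => simp [pvBytesVal]
  | cons b t ih =>
    simp only [List.map_cons, List.foldr_cons, ih]
    show _ = ((pvBytesVal ((b % 256).toNat :: t.map (fun b => (b % 256).toNat)) : Nat) : Int)
    unfold pvBytesVal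
    simp only [List.foldr_cons]
    push_cast
    have h := Int.emod_nonneg b (show (256:Int) ≠ 0 by norm_num)
    omega

-- the sliced, masked, recombined value, shifted and masked, is the bit-sum
theorem pv_main (data : List Int) (s c : Nat) :
    pvBytesVal (((data.drop (s/8)).take ((s % 8 + c + 7)/8)).map (fun b => (b % 256).toNat))
      / 2 ^ (s % 8) % 2 ^ c = pvG data s c := by
  set l := ((data.drop (s/8)).take ((s % 8 + c + 7)/8)).map (fun b => (b % 256).toNat) with hldef
  have hl : ∀ b ∈ l, b < 256 := by
    intro b hb
    rw [hldef] at hb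
    rcases List.mem_map.mp hb with ⟨x, -, hx⟩
    have h1 := Int.emod_nonneg x (show (256:Int) ≠ 0 by norm_num)
    have h2 := Int.emod_lt_of_pos x (show (0:Int) < 256 by norm_num)
    omega
  rw [pv_mod_two_pow_expand]
  unfold pvG
  apply Finset.sum_congr rfl
  intro i hi
  have hic : i < c := Finset.mem_range.mp hi
  congr 1
  rw [Nat.div_div_eq_div_mul, ← pow_add, pv_bit_of_bytesVal l hl (s % 8 + i)]
  unfold pvBitAt
  have e1 : (s + i) / 8 = s / 8 + (s % 8 + i) / 8 := by omega
  have e2 : (s + i) % 8 = (s % 8 + i) % 8 := by omega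
  rw [e1, e2]
  congr 1
  have hq : (s % 8 + i) / 8 < (s % 8 + c + 7) / 8 := by omega
  rw [List.getD_eq_getElem?_getD, hldef, List.getElem?_map, List.getElem?_take, if_pos hq,
      List.getElem?_drop]
  unfold pvByteAt
  cases hget : data[s / 8 + (s % 8 + i) / 8]? with
  | none =>
    rw [List.getD_eq_getElem?_getD, hget]
    rfl
  | some x =>
    rw [List.getD_eq_getElem?_getD, hget]
    rfl

theorem pv_shiftRight_natCast (v r : Nat) : ((v:Nat):Int) >>> r = ((v >>> r : Nat) : Int) := rfl

-- B equals the bit-sum pvG (for positive count)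
theorem pv_B_eq_G (data : List Int) (s c : Nat) (hc : 0 < c) :
    read_bits_alt data (s:Int) (c:Int) = ((pvG data s c : Nat) : Int) := by
  unfold read_bits_alt
  rw [if_neg (by push_cast; omega : ¬ ((c:Int) ≤ 0))]
  have h_sb : PySem.Int.floordiv (↑s) 8 = ((s/8 : Nat) : Int) := by
    exact_mod_cast PySem.Int.floordiv_natCast s 8
  have h_off : PySem.Int.mod (↑s) 8 = ((s%8 : Nat) : Int) := by
    exact_mod_cast PySem.Int.mod_natCast s 8
  have h_n : PySem.Int.floordiv (((s%8 : Nat) : Int) + ↑c + 7) 8 = (((s%8 + c + 7)/8 : Nat) : Int) := by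
    rw [show ((s%8:Nat):Int) + ↑c + 7 = ((s%8 + c + 7 : Nat) : Int) by push_cast; ring]
    exact_mod_cast PySem.Int.floordiv_natCast _ 8
  simp only [h_sb, h_off, h_n, Int.toNat_natCast, PySem.List.slice_natCast_add]
  rw [List.map_congr_left (fun b _ => pv_band_255 b), pv_foldr_natCast, pv_shiftRight_natCast]
  have hm : ((1 <<< c : Nat) : Int) - 1 = ((2^c - 1 : Nat) : Int) := by
    rw [Nat.one_shiftLeft]
    have h1 : (1:Nat) ≤ 2^c := Nat.one_le_two_pow
    push_cast [h1]
    ring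
  rw [hm, pv_band_natCast]
  norm_cast
  rw [Nat.shiftRight_eq_div_pow, Nat.and_two_pow_sub_one_eq_mod]
  exact pv_main data s c

theorem pv_pyRange_nonpos (b : Int) (h : b ≤ 0) : PySem.List.pyRange 0 b = [] := by
  unfold PySem.List.pyRange
  rw [if_neg (by norm_num), if_pos (by norm_num), if_neg (by omega)]
  simp

-- ===== VERDICT (by name: the statement is the Claim_ definition above) =====
theorem read_bits_spec : Claim_equal_read_bits := by
  intro data start_bit count _ hpre
  unfold Spec_read_bits
  rcases Int.le.dest hpre with ⟨s, hs⟩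
  by_cases hc : count ≤ 0
  · unfold read_bits read_bits_alt
    rw [pv_pyRange_nonpos count hc, if_pos hc]
    rfl
  · rw [not_le] at hc
    rcases Int.le.dest (le_of_lt hc) with ⟨c, hcc⟩
    simp only [zero_add] at hs hcc
    have hc' : 0 < c := by omega
    rw [← hs, ← hcc, pv_A_eq_G, pv_B_eq_G data s c hc']
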